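-- pv_equiv track=rewrite | github.com/elhamNikookar/Scalable-Deadlock-Detection | extra large/gao/dl2_deadlock_detector.py | _merge_deadlock_candidates
-- ===== SOURCE A (Python) =====
-- from typing import List, Dict, Tuple, Set, Optional, Any
--
-- def _merge_deadlock_candidates(candidates: List[Set[str]]) -> List[Set[str]]:
--     """Merge overlapping deadlock candidates"""
--     if not candidates:
--         return []
--
--     merged = []
--     candidates = [set(c) for c in candidates]
--
--     for candidate in candidates:
--         # Check if this candidate overlaps with any existing merged candidate
--         merged_with_existing = False
--
--         for i, existing in enumerate(merged):
--             if candidate & existing:  # Overlap exists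
--                 merged[i] = candidate | existing
--                 merged_with_existing = True
--                 break
--
--         if not merged_with_existing:
--             merged.append(candidate)
--
--     return merged
-- ===== SOURCE B (Python) =====
-- def _merge_deadlock_candidates(candidates):
--     """Merge overlapping deadlock candidates (element -> group-index map, one pass)."""
--     groups = []
--     where = {}  # element -> index of the first merged group containing it
--     for cand in candidates:
--         c = set(cand)
--         hits = [where[x] for x in c if x in where]
--         if hits:
--             g = min(hits)
--             groups[g] = c | groups[g]
--         else:
--             g = len(groups)
--             groups.append(c)
--         for x in c:
--             where[x] = g
--     return groups
-- ===== Notes on version B (the rewrite author's own statement) =====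
-- stated objective: alternative
-- what changed: Replaces the scan of all merged groups per candidate (a set-intersection test against each) by an element-to-first-group-index dictionary: each candidate looks up its own elements, merges into the minimum overlapping group index, and updates the map, so the inner scan over groups disappears.
import Mathlib
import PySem

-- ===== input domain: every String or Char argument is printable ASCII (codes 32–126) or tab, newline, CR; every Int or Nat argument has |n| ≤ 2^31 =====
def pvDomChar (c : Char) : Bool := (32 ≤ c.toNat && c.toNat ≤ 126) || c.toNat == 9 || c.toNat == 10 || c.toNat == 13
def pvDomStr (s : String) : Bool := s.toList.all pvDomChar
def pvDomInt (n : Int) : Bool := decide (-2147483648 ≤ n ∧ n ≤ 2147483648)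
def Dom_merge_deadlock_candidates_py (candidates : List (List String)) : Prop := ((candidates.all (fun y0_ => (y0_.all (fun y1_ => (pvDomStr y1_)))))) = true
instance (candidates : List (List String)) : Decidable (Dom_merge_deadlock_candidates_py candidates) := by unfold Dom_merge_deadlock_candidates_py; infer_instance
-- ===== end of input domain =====

-- B replaces A's per-candidate scan over all merged groups by an element→first-group-index
-- dictionary (merge into the minimum overlapping index): a different algorithm, same result.


-- ===== PORT A =====
-- inner loop of A: find the first existing merged set overlapping `c`, replace it by the
-- union `c | existing` (break), else append `c` at the end
def pvA_mergeInto (c : List String) (merged : List (List String)) : List (List String) :=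
  match merged with
  | [] => [c]
  | e :: rest =>
      if PySem.Set.inter c e ≠ [] then PySem.Set.union c e :: rest
      else e :: pvA_mergeInto c rest

def merge_deadlock_candidates_py (candidates : List (List String)) : List (List String) :=
  if candidates = [] then []
  else
    let cs := candidates.map (fun c => PySem.Set.ofList c)
    cs.foldl (fun merged candidate => pvA_mergeInto candidate merged) []

-- ===== PORT B =====
-- one step of B: look up each element of the candidate in the element→group-index map,
-- merge into the minimum hit index (updating that group in place), else append a new group;
-- then point every element of the candidate at that index
def pvB_step (st : List (List String) × PySem.Dict String Nat) (cand : List String) :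
    List (List String) × PySem.Dict String Nat :=
  let c := PySem.Set.ofList cand
  let hits := c.filterMap (fun x => st.2.get? x)
  match PySem.List.min? hits (fun y => y) with
  | some g => (st.1.set g (PySem.Set.union c (st.1.getD g [])),
               c.foldl (fun d x => d.insert x g) st.2)
  | none   => (st.1 ++ [c],
               c.foldl (fun d x => d.insert x st.1.length) st.2)

def merge_deadlock_candidates_py_alt (candidates : List (List String)) : List (List String) :=
  (candidates.foldl pvB_step ([], PySem.Dict.empty)).1

-- ===== PRECONDITION & SPEC =====
def Spec_merge_deadlock_candidates_py (candidates : List (List String)) (out : List (List String)) : Prop := out = merge_deadlock_candidates_py_alt candidates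
instance (candidates : List (List String)) (out : List (List String)) : Decidable (Spec_merge_deadlock_candidates_py candidates out) := by unfold Spec_merge_deadlock_candidates_py; infer_instance

-- ===== CLAIM (what is proved, stated in full; the proofs are below) =====
def Claim_equal_merge_deadlock_candidates_py : Prop := ∀ (candidates : List (List String)), Dom_merge_deadlock_candidates_py candidates → Spec_merge_deadlock_candidates_py candidates (merge_deadlock_candidates_py candidates)

-- ===== LEMMAS AND PROOFS =====

-- index of the first merged set containing x
def pvFIdx (x : String) : List (List String) → Option Nat
  | [] => none
  | e :: rest => if x ∈ e then some 0 else (pvFIdx x rest).map (· + 1)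

-- index of the first merged set overlapping c
def pvOIdx (c : List String) : List (List String) → Option Nat
  | [] => none
  | e :: rest => if PySem.Set.inter c e ≠ [] then some 0 else (pvOIdx c rest).map (· + 1)

-- the invariant tying B's dictionary to the merged list
def pvInv (ms : List (List String)) (d : PySem.Dict String Nat) : Prop :=
  ∀ x, d.get? x = pvFIdx x ms

theorem pvInter_ne_nil_iff (c e : List String) :
    PySem.Set.inter c e ≠ [] ↔ ∃ x, x ∈ c ∧ x ∈ e := by
  rw [Ne, List.eq_nil_iff_forall_not_mem]
  push Not
  simp [PySem.Set.mem_inter]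

theorem pvA_mergeInto_eq (c : List String) (ms : List (List String)) :
    pvA_mergeInto c ms =
      match pvOIdx c ms with
      | some j => ms.set j (PySem.Set.union c (ms.getD j []))
      | none => ms ++ [c] := by
  induction ms with
  | nil => rfl
  | cons e rest ih =>
    by_cases h : PySem.Set.inter c e ≠ []
    · simp [pvA_mergeInto, pvOIdx, h]
    · simp only [pvA_mergeInto, pvOIdx, if_neg h, ih]
      cases hr : pvOIdx c rest with
      | none => simp
      | some j => simp [List.getD]

theorem pvFIdx_none_iff (x : String) (ms : List (List String)) :
    pvFIdx x ms = none ↔ ∀ e ∈ ms, x ∉ e := by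
  induction ms with
  | nil => simp [pvFIdx]
  | cons e rest ih =>
    by_cases h : x ∈ e
    · simp [pvFIdx, h]
    · simp [pvFIdx, h, ih]

theorem pvFIdx_some (x : String) (ms : List (List String)) (j : Nat)
    (h : pvFIdx x ms = some j) : j < ms.length ∧ x ∈ ms.getD j [] := by
  induction ms generalizing j with
  | nil => simp [pvFIdx] at h
  | cons e rest ih =>
    by_cases hx : x ∈ e
    · simp only [pvFIdx, if_pos hx, Option.some.injEq] at h
      subst h; simpa [List.getD] using hx
    · simp only [pvFIdx, if_neg hx, Option.map_eq_some_iff] at h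
      obtain ⟨j0, hj0, rfl⟩ := h
      obtain ⟨h1, h2⟩ := ih j0 hj0
      exact ⟨by simpa using Nat.succ_lt_succ h1, by simpa [List.getD] using h2⟩

theorem pvFIdx_min (x : String) (ms : List (List String)) (j : Nat)
    (h : pvFIdx x ms = some j) : ∀ i, i < j → x ∉ ms.getD i [] := by
  induction ms generalizing j with
  | nil => simp [pvFIdx] at h
  | cons e rest ih =>
    intro i hi
    by_cases hx : x ∈ e
    · simp only [pvFIdx, if_pos hx, Option.some.injEq] at h
      omega
    · simp only [pvFIdx, if_neg hx, Option.map_eq_some_iff] at h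
      obtain ⟨j0, hj0, rfl⟩ := h
      cases i with
      | zero => simpa [List.getD] using hx
      | succ i0 =>
        have := ih j0 hj0 i0 (by omega)
        simpa [List.getD] using this

theorem pvFIdx_exists_le (x : String) (ms : List (List String)) (j : Nat)
    (hj : j < ms.length) (hx : x ∈ ms.getD j []) :
    ∃ j', pvFIdx x ms = some j' ∧ j' ≤ j := by
  induction ms generalizing j with
  | nil => simp at hj
  | cons e rest ih =>
    by_cases hx' : x ∈ e
    · exact ⟨0, by simp [pvFIdx, hx'], Nat.zero_le _⟩
    · cases j with
      | zero => exact absurd (by simpa [List.getD] using hx) hx'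
      | succ j0 =>
        obtain ⟨j', h1, h2⟩ := ih (j := j0) (by simpa using hj) (by simpa [List.getD] using hx)
        exact ⟨j' + 1, by simp [pvFIdx, hx', h1], by omega⟩

theorem pvOIdx_none_iff (c : List String) (ms : List (List String)) :
    pvOIdx c ms = none ↔ ∀ e ∈ ms, ¬ ∃ x, x ∈ c ∧ x ∈ e := by
  induction ms with
  | nil => simp [pvOIdx]
  | cons e rest ih =>
    by_cases h : PySem.Set.inter c e ≠ []
    · simp only [pvOIdx, if_pos h]
      constructor
      · intro hc; exact absurd hc (by simp)
      · intro hall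
        exact absurd ((pvInter_ne_nil_iff c e).mp h) (hall e (by simp))
    · simp only [pvOIdx, if_neg h, Option.map_eq_none_iff, ih]
      rw [not_not] at h
      constructor
      · intro hall f hf
        rcases List.mem_cons.mp hf with rfl | hf'
        · intro ⟨x, hx1, hx2⟩
          exact absurd ((pvInter_ne_nil_iff c f).mpr ⟨x, hx1, hx2⟩) (by simp [h])
        · exact hall f hf'
      · intro hall f hf
        exact hall f (List.mem_cons_of_mem _ hf)

theorem pvOIdx_some (c : List String) (ms : List (List String)) (j : Nat)
    (h : pvOIdx c ms = some j) :
    j < ms.length ∧ (∃ x, x ∈ c ∧ x ∈ ms.getD j []) := by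
  induction ms generalizing j with
  | nil => simp [pvOIdx] at h
  | cons e rest ih =>
    by_cases hx : PySem.Set.inter c e ≠ []
    · simp only [pvOIdx, if_pos hx, Option.some.injEq] at h
      subst h
      exact ⟨by simp, by simpa [List.getD] using (pvInter_ne_nil_iff c e).mp hx⟩
    · simp only [pvOIdx, if_neg hx, Option.map_eq_some_iff] at h
      obtain ⟨j0, hj0, rfl⟩ := h
      obtain ⟨h1, h2⟩ := ih j0 hj0
      exact ⟨by simpa using Nat.succ_lt_succ h1, by simpa [List.getD] using h2⟩

theorem pvOIdx_min (c : List String) (ms : List (List String)) (j : Nat)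
    (h : pvOIdx c ms = some j) :
    ∀ i, i < j → ¬ ∃ x, x ∈ c ∧ x ∈ ms.getD i [] := by
  induction ms generalizing j with
  | nil => simp [pvOIdx] at h
  | cons e rest ih =>
    intro i hi
    by_cases hx : PySem.Set.inter c e ≠ []
    · simp only [pvOIdx, if_pos hx, Option.some.injEq] at h
      omega
    · simp only [pvOIdx, if_neg hx, Option.map_eq_some_iff] at h
      obtain ⟨j0, hj0, rfl⟩ := h
      cases i with
      | zero =>
        rw [not_not] at hx
        intro ⟨x, hx1, hx2⟩
        exact absurd ((pvInter_ne_nil_iff c e).mpr ⟨x, hx1, by simpa [List.getD] using hx2⟩) (by simp [hx])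
      | succ i0 =>
        have := ih j0 hj0 i0 (by omega)
        simpa [List.getD] using this

theorem pvFIdx_eq_some (x : String) (ms : List (List String)) (j : Nat)
    (hj : j < ms.length) (hmem : x ∈ ms.getD j [])
    (hmin : ∀ i, i < j → x ∉ ms.getD i []) : pvFIdx x ms = some j := by
  obtain ⟨j', h1, h2⟩ := pvFIdx_exists_le x ms j hj hmem
  obtain ⟨hj'len, hmem'⟩ := pvFIdx_some x ms j' h1
  rcases Nat.lt_or_ge j' j with hlt | hge
  · exact absurd hmem' (hmin j' hlt)
  · have : j' = j := by omega
    subst this; exact h1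

theorem pvFIdx_congr (x : String) (ms ms' : List (List String))
    (hlen : ms.length = ms'.length)
    (hm : ∀ i, (x ∈ ms.getD i []) ↔ (x ∈ ms'.getD i [])) : pvFIdx x ms = pvFIdx x ms' := by
  induction ms generalizing ms' with
  | nil =>
    cases ms' with
    | nil => rfl
    | cons _ _ => simp at hlen
  | cons e rest ih =>
    cases ms' with
    | nil => simp at hlen
    | cons e' rest' =>
      have h0 := hm 0
      simp only [List.getD] at h0
      have htail : pvFIdx x rest = pvFIdx x rest' := by
        apply ih rest' (by simpa using hlen)
        intro i
        have := hm (i + 1)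
        simpa [List.getD] using this
      by_cases hx : x ∈ e
      · have hx' : x ∈ e' := by simpa using h0.mp (by simpa using hx)
        simp [pvFIdx, hx, hx']
      · have hx' : x ∉ e' := fun hc => hx (by simpa using h0.mpr (by simpa using hc))
        simp [pvFIdx, hx, hx', htail]

-- under the invariant, B's min over dictionary hits is A's first-overlap index
theorem pvMin_hits_eq (c : List String) (ms : List (List String)) (d : PySem.Dict String Nat)
    (hInv : pvInv ms d) :
    PySem.List.min? (c.filterMap (fun x => d.get? x)) (fun y => y) = pvOIdx c ms := by
  cases ho : pvOIdx c ms with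
  | none =>
    have hnil : c.filterMap (fun x => d.get? x) = [] := by
      rw [List.filterMap_eq_nil_iff]
      intro x hx
      rw [hInv x]
      cases hf : pvFIdx x ms with
      | none => rfl
      | some j =>
        obtain ⟨h1, h2⟩ := pvFIdx_some x ms j hf
        have hmem : ms.getD j [] ∈ ms := by
          rw [List.getD_eq_getElem ms [] h1]; exact List.getElem_mem h1
        exact absurd ⟨x, hx, h2⟩ ((pvOIdx_none_iff c ms).mp ho _ hmem)
    rw [hnil]
    rfl
  | some j =>
    obtain ⟨hjlen, x, hxc, hxm⟩ := pvOIdx_some c ms j ho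
    obtain ⟨j', hj', hle⟩ := pvFIdx_exists_le x ms j hjlen hxm
    obtain ⟨hj'len, hxm'⟩ := pvFIdx_some x ms j' hj'
    have hjj : j' = j := by
      rcases Nat.lt_or_ge j' j with hlt | hge
      · exact absurd ⟨x, hxc, hxm'⟩ (pvOIdx_min c ms j ho j' hlt)
      · omega
    subst hjj
    have hjmem : j' ∈ c.filterMap (fun x => d.get? x) := by
      rw [List.mem_filterMap]
      exact ⟨x, hxc, by rw [hInv x]; exact hj'⟩
    have hjmin : ∀ y ∈ c.filterMap (fun x => d.get? x), j' ≤ y := by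
      intro y hy
      rw [List.mem_filterMap] at hy
      obtain ⟨z, hzc, hz⟩ := hy
      rw [hInv z] at hz
      obtain ⟨hylen, hzm⟩ := pvFIdx_some z ms y hz
      by_contra hlt
      exact pvOIdx_min c ms j' ho y (by omega) ⟨z, hzc, hzm⟩
    cases hm : PySem.List.min? (c.filterMap (fun x => d.get? x)) (fun y => y) with
    | none =>
      rw [(PySem.List.min?_eq_none_iff _ _).mp hm] at hjmem
      simp at hjmem
    | some m =>
      have hmm := PySem.List.min?_mem hm
      have h1 : m ≤ j' := PySem.List.min?_isMin hm j' hjmem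
      exact congrArg some (le_antisymm h1 (hjmin m hmm))

theorem pvGet?_foldl_insert_const (l : List String) (g : Nat) (d : PySem.Dict String Nat)
    (y : String) :
    (l.foldl (fun d x => d.insert x g) d).get? y = if y ∈ l then some g else d.get? y := by
  induction l generalizing d with
  | nil => simp
  | cons a t ih =>
    simp only [List.foldl_cons, ih, List.mem_cons]
    by_cases ht : y ∈ t
    · simp [ht]
    · simp [ht, PySem.Dict.get?_insert]

theorem pvFIdx_set (x : String) (c : List String) (ms : List (List String)) (j : Nat)
    (hj : pvOIdx c ms = some j) :
    pvFIdx x (ms.set j (PySem.Set.union c (ms.getD j []))) =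
      if x ∈ c then some j else pvFIdx x ms := by
  obtain ⟨hjlen, z, hzc, hzm⟩ := pvOIdx_some c ms j hj
  by_cases hx : x ∈ c
  · rw [if_pos hx]
    have hlen' : j < (ms.set j (PySem.Set.union c (ms.getD j []))).length := by simpa using hjlen
    apply pvFIdx_eq_some _ _ _ hlen'
    · rw [List.getD_eq_getElem _ [] hlen', List.getElem_set_self]
      exact (PySem.Set.mem_union _ _ _).mpr (Or.inl hx)
    · intro i hi
      have hilen : i < ms.length := by omega
      rw [List.getD_eq_getElem _ [] (by simpa using hilen), List.getElem_set_ne (by omega)]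
      intro hmem
      exact pvOIdx_min c ms j hj i hi ⟨x, hx, by rwa [List.getD_eq_getElem ms [] hilen]⟩
  · rw [if_neg hx]
    apply (pvFIdx_congr x _ _ (by simp) _).symm
    intro i
    by_cases hij : i = j
    · subst hij
      rw [List.getD_eq_getElem ms [] hjlen, List.getD_eq_getElem _ [] (by simpa using hjlen),
        List.getElem_set_self]
      rw [PySem.Set.mem_union]
      tauto
    · by_cases hilen : i < ms.length
      · rw [List.getD_eq_getElem ms [] hilen, List.getD_eq_getElem _ [] (by simpa using hilen),
          List.getElem_set_ne (by omega)]
      · rw [List.getD_eq_default ms [] (by omega), List.getD_eq_default _ [] (by simp; omega)]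

theorem pvFIdx_append (x : String) (c : List String) (ms : List (List String))
    (hnone : pvOIdx c ms = none) :
    pvFIdx x (ms ++ [c]) = if x ∈ c then some ms.length else pvFIdx x ms := by
  by_cases hx : x ∈ c
  · rw [if_pos hx]
    apply pvFIdx_eq_some _ _ _ (by simp)
    · rw [List.getD_eq_getElem _ [] (by simp)]
      simpa using hx
    · intro i hi
      rw [List.getD_eq_getElem _ [] (by simp; omega), List.getElem_append_left hi]
      intro hmem
      have hmem' : ms.getD i [] ∈ ms := by
        rw [List.getD_eq_getElem ms [] hi]; exact List.getElem_mem hi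
      exact (pvOIdx_none_iff c ms).mp hnone _ hmem' ⟨x, hx, by rwa [List.getD_eq_getElem ms [] hi]⟩
  · rw [if_neg hx]
    cases hf : pvFIdx x ms with
    | none =>
      rw [pvFIdx_none_iff]
      intro e he
      rcases List.mem_append.mp he with he' | he'
      · exact (pvFIdx_none_iff x ms).mp hf e he'
      · simp at he'; subst he'; exact hx
    | some j =>
      obtain ⟨hjlen, hmem⟩ := pvFIdx_some x ms j hf
      apply pvFIdx_eq_some _ _ _ (by simp; omega)
      · rwa [List.getD_eq_getElem _ [] (by simp; omega), List.getElem_append_left hjlen,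
          ← List.getD_eq_getElem ms [] hjlen]
      · intro i hi
        have hilen : i < ms.length := by omega
        rw [List.getD_eq_getElem _ [] (by simp; omega), List.getElem_append_left hilen,
          ← List.getD_eq_getElem ms [] hilen]
        exact pvFIdx_min x ms j hf i hi

-- one step of B equals one step of A and preserves the invariant
theorem pvStep (cand : List String) (ms : List (List String)) (d : PySem.Dict String Nat)
    (hInv : pvInv ms d) :
    (pvB_step (ms, d) cand).1 = pvA_mergeInto (PySem.Set.ofList cand) ms ∧
      pvInv (pvB_step (ms, d) cand).1 (pvB_step (ms, d) cand).2 := by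
  have hmin := pvMin_hits_eq (PySem.Set.ofList cand) ms d hInv
  unfold pvB_step
  simp only [hmin]
  cases ho : pvOIdx (PySem.Set.ofList cand) ms with
  | some j =>
    constructor
    · rw [pvA_mergeInto_eq, ho]
    · intro x
      rw [pvGet?_foldl_insert_const, pvFIdx_set x _ ms j ho]
      by_cases hx : x ∈ PySem.Set.ofList cand
      · simp [hx]
      · simp [hx, hInv x]
  | none =>
    constructor
    · rw [pvA_mergeInto_eq, ho]
    · intro x
      rw [pvGet?_foldl_insert_const, pvFIdx_append x _ ms ho]
      by_cases hx : x ∈ PySem.Set.ofList cand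
      · simp [hx]
      · simp [hx, hInv x]

theorem pvFold (l : List (List String)) (ms : List (List String)) (d : PySem.Dict String Nat)
    (hInv : pvInv ms d) :
    (l.foldl pvB_step (ms, d)).1 =
      l.foldl (fun m c => pvA_mergeInto (PySem.Set.ofList c) m) ms := by
  induction l generalizing ms d with
  | nil => rfl
  | cons cand t ih =>
    obtain ⟨h1, h2⟩ := pvStep cand ms d hInv
    simp only [List.foldl_cons]
    rw [show pvB_step (ms, d) cand = ((pvB_step (ms, d) cand).1, (pvB_step (ms, d) cand).2) from rfl]
    rw [ih _ _ h2, h1]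

-- ===== VERDICT (by name: the statement is the Claim_ definition above) =====
theorem merge_deadlock_candidates_py_spec : Claim_equal_merge_deadlock_candidates_py := by
  intro candidates _
  unfold Spec_merge_deadlock_candidates_py merge_deadlock_candidates_py merge_deadlock_candidates_py_alt
  have hInv0 : pvInv [] PySem.Dict.empty := by
    intro x; simp [pvFIdx, PySem.Dict.get?_empty]
  by_cases h : candidates = []
  · subst h; rfl
  · rw [if_neg h, pvFold candidates [] PySem.Dict.empty hInv0, List.foldl_map]
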